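-- pv_equiv track=rewrite | github.com/sachdevaanisha/information-retrieval | Aspect 1-4/permuterm_index_component.py | calculateRotations
-- ===== SOURCE A (Python) =====
-- def calculateRotations(term):
--     rotations = []
--     # Check if term is not empty
--     if term:
--         rotation = term + '$'
--         rotations.append(rotation)
--         for char in term:
--             # Each iteration place the first char at the end of rotation
--             rotation = rotation[1:] + char
--             rotations.append(rotation)
--     return rotations
-- ===== SOURCE B (Python) =====
-- def calculateRotations(term):
--     if not term:
--         return []
--     s = term + '$'
--     return [s[i:] + s[:i] for i in range(len(s))]
-- ===== Notes on version B (the rewrite author's own statement) =====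
-- stated objective: simpler
-- what changed: B computes each rotation independently by offset slicing of term+'$' in a single comprehension instead of threading a running rotation accumulator that moves the first char to the end step by step.
import Mathlib
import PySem

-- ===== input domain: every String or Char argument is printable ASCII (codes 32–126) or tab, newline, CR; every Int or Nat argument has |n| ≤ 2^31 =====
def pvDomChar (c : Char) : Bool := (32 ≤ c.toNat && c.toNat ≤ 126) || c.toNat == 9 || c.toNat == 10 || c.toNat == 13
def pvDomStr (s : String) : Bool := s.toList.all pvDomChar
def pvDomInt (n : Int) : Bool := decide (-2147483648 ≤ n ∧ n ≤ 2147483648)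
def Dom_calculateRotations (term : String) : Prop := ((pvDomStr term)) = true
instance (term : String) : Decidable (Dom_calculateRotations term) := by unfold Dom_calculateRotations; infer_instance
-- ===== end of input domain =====

-- B builds each rotation independently by offset slicing instead of A's running accumulator; objective: simpler.

-- ===== PORT A =====
-- literal port of A: append term+'$', then repeatedly move the first char to the end,
-- collecting every intermediate rotation (strings handled as List Char per PySem).
def calculateRotations (term : String) : List String :=
  if term.toList = [] then []
  else
    let rot0 : List Char := term.toList ++ ['$']
    let res := term.toList.foldl
      (fun (st : List Char × List (List Char)) c =>
        let rot := PySem.List.slice st.1 (some 1) none ++ [c]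
        (rot, st.2 ++ [rot]))
      (rot0, [rot0])
    res.2.map String.ofList

-- ===== PORT B =====
-- literal port of B: s = term+'$'; [s[i:] + s[:i] for i in range(len(s))]
def calculateRotations_alt (term : String) : List String :=
  if term.toList = [] then []
  else
    let s : List Char := term.toList ++ ['$']
    (PySem.List.pyRange 0 (s.length : Int) 1).map
      (fun i => String.ofList (PySem.List.slice s (some i) none ++ PySem.List.slice s none (some i)))

-- ===== PRECONDITION & SPEC =====
def Spec_calculateRotations (term : String) (out : List String) : Prop := out = calculateRotations_alt term
instance (term : String) (out : List String) : Decidable (Spec_calculateRotations term out) := by unfold Spec_calculateRotations; infer_instance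

-- ===== CLAIM (what is proved, stated in full; the proofs are below) =====
def Claim_equal_calculateRotations : Prop := ∀ (term : String), Dom_calculateRotations term → Spec_calculateRotations term (calculateRotations term)

-- ===== LEMMAS AND PROOFS =====

-- A's loop, abstracted: the list of rotations it emits, as structural recursion.
def rotsA : List Char → List Char → List (List Char)
  | [], _ => []
  | c :: cs, rest => (cs ++ rest ++ [c]) :: rotsA cs (rest ++ [c])

-- A's fold produces exactly rotsA, for a state whose rotation starts with the chars still to process.
lemma foldl_eq_rotsA (cs : List Char) : ∀ (rest : List Char) (acc : List (List Char)),
    (cs.foldl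
      (fun (st : List Char × List (List Char)) c =>
        let rot := PySem.List.slice st.1 (some 1) none ++ [c]
        (rot, st.2 ++ [rot]))
      (cs ++ rest, acc)).2 = acc ++ rotsA cs rest := by
  induction cs with
  | nil => intro rest acc; simp [rotsA]
  | cons c cs ih =>
    intro rest acc
    simp only [List.foldl_cons, rotsA]
    rw [PySem.List.slice_from_one]
    simp only [List.cons_append, List.tail_cons]
    have := ih (rest ++ [c]) (acc ++ [cs ++ (rest ++ [c])])
    simp only [List.append_assoc] at this ⊢
    rw [this]
    simp

-- rotsA equals the slice-based rotations, shifted by one.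
lemma rotsA_eq (cs : List Char) : ∀ (rest : List Char),
    rotsA cs rest = (List.range cs.length).map
      (fun i => (cs ++ rest).drop (i + 1) ++ (cs ++ rest).take (i + 1)) := by
  induction cs with
  | nil => intro rest; simp [rotsA]
  | cons c cs ih =>
    intro rest
    simp only [rotsA, List.length_cons, List.range_succ_eq_map, List.map_cons, List.map_map]
    congr 1
    rw [ih (rest ++ [c])]
    apply List.map_congr_left
    intro i hi
    simp only [List.mem_range] at hi
    simp only [Function.comp_apply]
    have hle : i + 1 ≤ (cs ++ rest).length := by
      simp [List.length_append]; omega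
    rw [← List.append_assoc, List.drop_append_of_le_length hle,
        List.take_append_of_le_length hle]
    simp [List.append_assoc, Nat.succ_eq_add_one]

-- ===== VERDICT (by name: the statement is the Claim_ definition above) =====
theorem calculateRotations_spec : Claim_equal_calculateRotations := by
  intro term _
  unfold Spec_calculateRotations calculateRotations calculateRotations_alt
  by_cases h : term.toList = []
  · simp [h]
  · simp only [if_neg h]
    rw [foldl_eq_rotsA term.toList ['$'] [term.toList ++ ['$']], rotsA_eq]
    rw [PySem.List.pyRange_one]
    have hlen : ((((term.toList ++ ['$']).length : Int)) - 0).toNat = term.toList.length + 1 := by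
      simp
    rw [hlen, List.range_succ_eq_map]
    simp only [List.map_cons, List.map_map, List.singleton_append]
    congr 1
    · have h0 : ((0 : Int) + ((0 : Nat) : Int)) = ((0 : Nat) : Int) := by norm_num
      rw [h0, PySem.List.slice_from_natCast, PySem.List.slice_to_natCast]
      simp
    · apply List.map_congr_left
      intro i hi
      simp only [Function.comp_apply]
      have hc : ((0 : Int) + ((Nat.succ i : Nat) : Int)) = (((i + 1 : Nat)) : Int) := by
        push_cast; ring
      rw [hc, PySem.List.slice_from_natCast, PySem.List.slice_to_natCast]
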